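-- pv_equiv track=rewrite | github.com/prytkovv/school42-pool-django | d01/ex05/all_in.py | get_capital_or_state
-- ===== SOURCE A (Python) =====
-- def get_key_from_dict(my_dict: dict, value: str) -> str:
--     return ''.join([k for k, v in my_dict.items() if v == value])
--
-- def get_capital_or_state(word: str) -> str:
--     states = {
--         'Oregon': 'OR',
--         'Alabama': 'AL',
--         'New Jersey': 'NJ',
--         'Colorado': 'CO'
--     }
--     capital_cities = {
--         'OR': 'Salem',
--         'AL': 'Montgomery',
--         'NJ': 'Trenton',
--         'CO': 'Denver'
--     }
--     if word.lower() in {k.lower(): v for k, v in states.items()}: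
--         word = ''.join(k for k in states.keys() if k.lower() == word.lower())
--         return '%s is the capital of %s' % (capital_cities[states[word]], word)
--     elif get_key_from_dict({k: v.lower() for k, v in capital_cities.items()}, word.lower()):
--         word = ''.join(v for v in capital_cities.values() if v.lower() == word.lower())
--         return '%s is the capital of %s' % (word, get_key_from_dict(states, get_key_from_dict(capital_cities, word)))
--     else:
--         return '%s is not a capital or a state' % word
-- ===== SOURCE B (Python) =====
-- def get_capital_or_state(word: str) -> str:
--     states = {
--         'Oregon': 'OR',
--         'Alabama': 'AL',
--         'New Jersey': 'NJ',
--         'Colorado': 'CO'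
--     }
--     capital_cities = {
--         'OR': 'Salem',
--         'AL': 'Montgomery',
--         'NJ': 'Trenton',
--         'CO': 'Denver'
--     }
--     table = {}
--     for state, code in states.items():
--         city = capital_cities[code]
--         answer = '%s is the capital of %s' % (city, state)
--         table[state.lower()] = answer
--         table[city.lower()] = answer
--     return table.get(word.lower(), '%s is not a capital or a state' % word)
-- ===== Notes on version B (the rewrite author's own statement) =====
-- stated objective: simpler
-- what changed: Replaces the two membership branches with repeated dict scans and nested reverse-lookups (get_key_from_dict chains) by a single pass that precomputes a lowercase-key -> answer table, followed by one table.get with the default message.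
import Mathlib
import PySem

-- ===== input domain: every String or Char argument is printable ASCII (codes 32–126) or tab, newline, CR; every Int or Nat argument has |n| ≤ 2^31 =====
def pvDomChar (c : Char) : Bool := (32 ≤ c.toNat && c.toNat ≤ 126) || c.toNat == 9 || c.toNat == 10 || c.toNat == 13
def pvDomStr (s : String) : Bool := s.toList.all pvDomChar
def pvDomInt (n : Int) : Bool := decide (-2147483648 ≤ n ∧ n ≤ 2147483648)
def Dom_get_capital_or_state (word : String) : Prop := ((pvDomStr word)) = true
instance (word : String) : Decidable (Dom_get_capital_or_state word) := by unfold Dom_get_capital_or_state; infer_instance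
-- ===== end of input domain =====

-- B replaces A's two membership branches with nested reverse dict scans by one precomputed
-- lowercase-key -> answer table and a single lookup with a default (objective: simpler).

-- ===== PORT A =====
-- ''.join([k for k, v in my_dict.items() if v == value])
def get_key_from_dict (my_dict : PySem.Dict String String) (value : String) : String :=
  PySem.Str.join "" ((my_dict.items.filter (fun kv => kv.2 == value)).map (fun kv => kv.1))

def get_capital_or_state (word : String) : String :=
  let states : PySem.Dict String String :=
    PySem.Dict.ofList [("Oregon", "OR"), ("Alabama", "AL"), ("New Jersey", "NJ"), ("Colorado", "CO")]
  let capital_cities : PySem.Dict String String :=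
    PySem.Dict.ofList [("OR", "Salem"), ("AL", "Montgomery"), ("NJ", "Trenton"), ("CO", "Denver")]
  if (PySem.Dict.ofList (states.items.map (fun kv => (PySem.Str.lower kv.1, kv.2)))).contains
      (PySem.Str.lower word) then
    let word' := PySem.Str.join ""
      (states.keys.filter (fun k => PySem.Str.lower k == PySem.Str.lower word))
    -- capital_cities[states[word]]: both lookups always hit in this branch, so getD "" is exact
    (capital_cities.getD (states.getD word' "") "") ++ " is the capital of " ++ word'
  else if get_key_from_dict
      (PySem.Dict.ofList (capital_cities.items.map (fun kv => (kv.1, PySem.Str.lower kv.2))))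
      (PySem.Str.lower word) != "" then
    let word' := PySem.Str.join ""
      (capital_cities.values.filter (fun v => PySem.Str.lower v == PySem.Str.lower word))
    word' ++ " is the capital of " ++ get_key_from_dict states (get_key_from_dict capital_cities word')
  else
    word ++ " is not a capital or a state"

-- ===== PORT B =====
def get_capital_or_state_alt (word : String) : String :=
  let states : PySem.Dict String String :=
    PySem.Dict.ofList [("Oregon", "OR"), ("Alabama", "AL"), ("New Jersey", "NJ"), ("Colorado", "CO")]
  let capital_cities : PySem.Dict String String :=
    PySem.Dict.ofList [("OR", "Salem"), ("AL", "Montgomery"), ("NJ", "Trenton"), ("CO", "Denver")]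
  let table : PySem.Dict String String :=
    states.items.foldl (fun t kv =>
      -- capital_cities[code] always hits, so getD "" is exact
      let city := capital_cities.getD kv.2 ""
      let answer := city ++ " is the capital of " ++ kv.1
      (t.insert (PySem.Str.lower kv.1) answer).insert (PySem.Str.lower city) answer)
      PySem.Dict.empty
  table.getD (PySem.Str.lower word) (word ++ " is not a capital or a state")

-- ===== PRECONDITION & SPEC =====
def Spec_get_capital_or_state (word : String) (out : String) : Prop := out = get_capital_or_state_alt word
instance (word : String) (out : String) : Decidable (Spec_get_capital_or_state word out) := by unfold Spec_get_capital_or_state; infer_instance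

-- ===== CLAIM (what is proved, stated in full; the proofs are below) =====
def Claim_equal_get_capital_or_state : Prop := ∀ (word : String), Dom_get_capital_or_state word → Spec_get_capital_or_state word (get_capital_or_state word)

-- ===== LEMMAS AND PROOFS =====
theorem gcos_eq_of_lower_eq (word : String) (key : String)
    (h : PySem.Str.lower word = key)
    (hk : key = "oregon" ∨ key = "alabama" ∨ key = "new jersey" ∨ key = "colorado" ∨
          key = "salem" ∨ key = "montgomery" ∨ key = "trenton" ∨ key = "denver") :
    get_capital_or_state word = get_capital_or_state_alt word := by
  rcases hk with rfl | rfl | rfl | rfl | rfl | rfl | rfl | rfl <;>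
    (simp only [get_capital_or_state, get_capital_or_state_alt, h]; rfl)

theorem gcos_eq_default (word : String)
    (h1 : PySem.Str.lower word ≠ "oregon") (h2 : PySem.Str.lower word ≠ "alabama")
    (h3 : PySem.Str.lower word ≠ "new jersey") (h4 : PySem.Str.lower word ≠ "colorado")
    (h5 : PySem.Str.lower word ≠ "salem") (h6 : PySem.Str.lower word ≠ "montgomery")
    (h7 : PySem.Str.lower word ≠ "trenton") (h8 : PySem.Str.lower word ≠ "denver") :
    get_capital_or_state word = get_capital_or_state_alt word := by
  simp only [get_capital_or_state, get_capital_or_state_alt]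
  generalize hg : PySem.Str.lower word = lw at h1 h2 h3 h4 h5 h6 h7 h8 ⊢
  have d0 : (PySem.Dict.ofList [("Oregon", "OR"), ("Alabama", "AL"), ("New Jersey", "NJ"), ("Colorado", "CO")] : PySem.Dict String String) = PySem.Dict.mk [("Oregon", "OR"), ("Alabama", "AL"), ("New Jersey", "NJ"), ("Colorado", "CO")] := by decide
  have d1 : (PySem.Dict.ofList [("OR", "Salem"), ("AL", "Montgomery"), ("NJ", "Trenton"), ("CO", "Denver")] : PySem.Dict String String) = PySem.Dict.mk [("OR", "Salem"), ("AL", "Montgomery"), ("NJ", "Trenton"), ("CO", "Denver")] := by decide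
  rw [d0, d1]
  have d2 : (PySem.Dict.ofList (List.map (fun kv => (PySem.Str.lower kv.1, kv.2)) (PySem.Dict.mk [("Oregon", "OR"), ("Alabama", "AL"), ("New Jersey", "NJ"), ("Colorado", "CO")]).items) : PySem.Dict String String) = PySem.Dict.mk [("oregon", "OR"), ("alabama", "AL"), ("new jersey", "NJ"), ("colorado", "CO")] := by decide
  have d3 : (PySem.Dict.ofList (List.map (fun kv => (kv.1, PySem.Str.lower kv.2)) (PySem.Dict.mk [("OR", "Salem"), ("AL", "Montgomery"), ("NJ", "Trenton"), ("CO", "Denver")]).items) : PySem.Dict String String) = PySem.Dict.mk [("OR", "salem"), ("AL", "montgomery"), ("NJ", "trenton"), ("CO", "denver")] := by decide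
  rw [d2, d3]
  have e1 : PySem.Str.lower "Oregon" = "oregon" := by decide
  have e2 : PySem.Str.lower "Alabama" = "alabama" := by decide
  have e3 : PySem.Str.lower "New Jersey" = "new jersey" := by decide
  have e4 : PySem.Str.lower "Colorado" = "colorado" := by decide
  have e5 : PySem.Str.lower "Salem" = "salem" := by decide
  have e6 : PySem.Str.lower "Montgomery" = "montgomery" := by decide
  have e7 : PySem.Str.lower "Trenton" = "trenton" := by decide
  have e8 : PySem.Str.lower "Denver" = "denver" := by decide
  simp [get_key_from_dict, PySem.Dict.contains_mk, PySem.Dict.get?_mk_cons,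
    PySem.Dict.getD, PySem.Dict.get?_insert, PySem.Dict.get?_empty, PySem.Str.join,
    e1, e2, e3, e4, e5, e6, e7, e8,
    h1, h2, h3, h4, h5, h6, h7, h8,
    Ne.symm h1, Ne.symm h2, Ne.symm h3, Ne.symm h4,
    Ne.symm h5, Ne.symm h6, Ne.symm h7, Ne.symm h8]

-- ===== VERDICT (by name: the statement is the Claim_ definition above) =====
theorem get_capital_or_state_spec : Claim_equal_get_capital_or_state := by
  intro word _
  unfold Spec_get_capital_or_state
  by_cases h1 : PySem.Str.lower word = "oregon"
  · exact gcos_eq_of_lower_eq word _ h1 (Or.inl rfl)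
  by_cases h2 : PySem.Str.lower word = "alabama"
  · exact gcos_eq_of_lower_eq word _ h2 (Or.inr (Or.inl rfl))
  by_cases h3 : PySem.Str.lower word = "new jersey"
  · exact gcos_eq_of_lower_eq word _ h3 (Or.inr (Or.inr (Or.inl rfl)))
  by_cases h4 : PySem.Str.lower word = "colorado"
  · exact gcos_eq_of_lower_eq word _ h4 (Or.inr (Or.inr (Or.inr (Or.inl rfl))))
  by_cases h5 : PySem.Str.lower word = "salem"
  · exact gcos_eq_of_lower_eq word _ h5 (Or.inr (Or.inr (Or.inr (Or.inr (Or.inl rfl)))))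
  by_cases h6 : PySem.Str.lower word = "montgomery"
  · exact gcos_eq_of_lower_eq word _ h6 (Or.inr (Or.inr (Or.inr (Or.inr (Or.inr (Or.inl rfl))))))
  by_cases h7 : PySem.Str.lower word = "trenton"
  · exact gcos_eq_of_lower_eq word _ h7 (Or.inr (Or.inr (Or.inr (Or.inr (Or.inr (Or.inr (Or.inl rfl)))))))
  by_cases h8 : PySem.Str.lower word = "denver"
  · exact gcos_eq_of_lower_eq word _ h8 (Or.inr (Or.inr (Or.inr (Or.inr (Or.inr (Or.inr (Or.inr rfl)))))))
  exact gcos_eq_default word h1 h2 h3 h4 h5 h6 h7 h8
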